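-- pv_equiv track=rewrite | github.com/rightleftspin/NLCE-Diagonalization-Summation | cluster_around.py | create_bond_info
-- ===== SOURCE A (Python) =====
-- def create_bond_info(points):
--     # takes in a list of points and returns a list of
--     # bonds and an adjecency dictionary
--     adj_dict = {}
--     bond_list = []
--     for ind, node in enumerate(points):
--         adj_dict[ind] = set()
--         connections = [(node[0] + 1, node[1]), (node[0], node[1] + 1), (node[0] - 1, node[1]), (node[0], node[1] - 1), (node[0] - 1, node[1] - 1), (node[0] + 1, node[1] + 1)]
--         for ind_other, node_other in enumerate(points):
--             if node_other in connections:
--                 adj_dict[ind].add(ind_other)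
--                 if ind_other > ind:
--                     bond_list.append((ind, ind_other, 1))
--
--     return(bond_list, adj_dict)
-- ===== SOURCE B (Python) =====
-- def create_bond_info(points):
--     # hash each point to the ascending list of its indices, then look up each
--     # node's six neighbor offsets instead of rescanning all points (O(n) vs O(n^2))
--     index = {}
--     for i, p in enumerate(points):
--         index.setdefault(p, []).append(i)
--     offsets = [(1, 0), (0, 1), (-1, 0), (0, -1), (-1, -1), (1, 1)]
--     bond_list = []
--     adj_dict = {}
--     for i, (x, y) in enumerate(points):
--         nbrs = sorted(j for dx, dy in offsets for j in index.get((x + dx, y + dy), []))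
--         adj_dict[i] = set(nbrs)
--         bond_list.extend((i, j, 1) for j in nbrs if j > i)
--     return (bond_list, adj_dict)
-- ===== Notes on version B (the rewrite author's own statement) =====
-- stated objective: faster
-- what changed: B builds a hash map from point to its ascending index list once, then for each node looks up only its six neighbor offsets and sorts the few hits, instead of A's inner rescan of all points for every node.
import Mathlib
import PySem

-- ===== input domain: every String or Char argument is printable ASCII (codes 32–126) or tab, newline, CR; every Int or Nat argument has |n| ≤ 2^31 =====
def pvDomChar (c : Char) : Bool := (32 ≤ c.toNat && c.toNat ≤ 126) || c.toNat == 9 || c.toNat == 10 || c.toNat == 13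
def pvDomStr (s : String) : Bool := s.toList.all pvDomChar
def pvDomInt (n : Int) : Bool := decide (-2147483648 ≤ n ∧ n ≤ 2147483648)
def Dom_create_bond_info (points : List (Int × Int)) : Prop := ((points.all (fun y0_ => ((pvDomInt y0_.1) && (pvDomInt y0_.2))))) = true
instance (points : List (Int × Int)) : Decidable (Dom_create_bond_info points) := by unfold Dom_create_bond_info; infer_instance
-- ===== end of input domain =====

-- B replaces A's inner full scan by a point→indices hash map plus six offset lookups per node (sorted);
-- equal output including bond order and adjacency-set build order.

-- ===== PORT A =====
-- the six candidate neighbour points of a node, in A's literal order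
def cbiConns (node : Int × Int) : List (Int × Int) :=
  [(node.1 + 1, node.2), (node.1, node.2 + 1), (node.1 - 1, node.2),
   (node.1, node.2 - 1), (node.1 - 1, node.2 - 1), (node.1 + 1, node.2 + 1)]

-- body of A's inner loop over `enumerate(points)` (state = (adj_dict, bond_list))
def cbiStepA (conns : List (Int × Int)) (k : Int)
    (st : PySem.Dict Int (PySem.Set Int) × List (Int × Int × Int)) (q : Int × (Int × Int)) :
    PySem.Dict Int (PySem.Set Int) × List (Int × Int × Int) :=
  if q.2 ∈ conns then
    (st.1.modify k PySem.Set.empty (fun s => PySem.Set.add s q.1),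
     if q.1 > k then st.2 ++ [(k, q.1, 1)] else st.2)
  else st

def create_bond_info (points : List (Int × Int)) :
    (List (Int × Int × Int)) × (List (Int × List Int)) :=
  let st := (PySem.List.enumerate points).foldl
    (fun st p =>
      (PySem.List.enumerate points).foldl (cbiStepA (cbiConns p.2) p.1)
        (st.1.insert p.1 PySem.Set.empty, st.2))
    (PySem.Dict.empty, ([] : List (Int × Int × Int)))
  (st.2, st.1.items)

-- ===== PORT B =====
def cbiOffsets : List (Int × Int) := [(1, 0), (0, 1), (-1, 0), (0, -1), (-1, -1), (1, 1)]

-- point → ascending list of its indices; `setdefault(p, []).append(i)` stores exactly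
-- `old ++ [i]` at p's existing position (or appends a new key), which is `insert` here
def cbiIndex (points : List (Int × Int)) : PySem.Dict (Int × Int) (List Int) :=
  (PySem.List.enumerate points).foldl
    (fun d p => d.insert p.2 (d.getD p.2 [] ++ [p.1])) PySem.Dict.empty

def cbiNbrs (index : PySem.Dict (Int × Int) (List Int)) (node : Int × Int) : List Int :=
  PySem.List.sorted
    (cbiOffsets.flatMap (fun o => index.getD (node.1 + o.1, node.2 + o.2) []))
    (fun j => j) false

def create_bond_info_alt (points : List (Int × Int)) :
    (List (Int × Int × Int)) × (List (Int × List Int)) :=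
  let index := cbiIndex points
  let st := (PySem.List.enumerate points).foldl
    (fun st p =>
      let nbrs := cbiNbrs index p.2
      (st.1 ++ (nbrs.filter (fun j => j > p.1)).map (fun j => (p.1, j, 1)),
       st.2.insert p.1 (PySem.Set.ofList nbrs)))
    (([] : List (Int × Int × Int)), (PySem.Dict.empty : PySem.Dict Int (PySem.Set Int)))
  (st.1, st.2.items)

-- ===== PRECONDITION & SPEC =====
def Spec_create_bond_info (points : List (Int × Int)) (out : (List (Int × Int × Int)) × (List (Int × List Int))) : Prop := out = create_bond_info_alt points
instance (points : List (Int × Int)) (out : (List (Int × Int × Int)) × (List (Int × List Int))) : Decidable (Spec_create_bond_info points out) := by unfold Spec_create_bond_info; infer_instance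

-- ===== CLAIM (what is proved, stated in full; the proofs are below) =====
def Claim_equal_create_bond_info : Prop := ∀ (points : List (Int × Int)), Dom_create_bond_info points → Spec_create_bond_info points (create_bond_info points)

-- ===== LEMMAS AND PROOFS =====

-- A's adjacency row for one node, as a plain list (match indices in ascending order)
def cbiRow (points : List (Int × Int)) (node : Int × Int) : List Int :=
  ((PySem.List.enumerate points).filter (fun q => decide (q.2 ∈ cbiConns node))).map (·.1)

-- A's per-node set-building fold
def cbiRowV (points : List (Int × Int)) (node : Int × Int) : PySem.Set Int :=
  (PySem.List.enumerate points).foldl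
    (fun s q => if q.2 ∈ cbiConns node then PySem.Set.add s q.1 else s) PySem.Set.empty

-- A's per-node bond contribution
def cbiBondsA (points : List (Int × Int)) (p : Int × (Int × Int)) : List (Int × Int × Int) :=
  ((PySem.List.enumerate points).filter
      (fun q => decide (q.2 ∈ cbiConns p.2) && decide (q.1 > p.1))).map (fun q => (p.1, q.1, 1))

lemma cbiConns_nodup (node : Int × Int) : (cbiConns node).Nodup := by
  simp [cbiConns, List.nodup_cons, Prod.ext_iff]
  omega

-- A's inner loop, starting from a dict whose entry at k is v
lemma cbiInnerA (conns : List (Int × Int)) (k : Int) :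
    ∀ (l : List (Int × (Int × Int))) (d : PySem.Dict Int (PySem.Set Int))
      (v : PySem.Set Int) (b : List (Int × Int × Int)),
    l.foldl (cbiStepA conns k) (d.insert k v, b)
      = (d.insert k (l.foldl (fun s q => if q.2 ∈ conns then PySem.Set.add s q.1 else s) v),
         b ++ (l.filter (fun q => decide (q.2 ∈ conns) && decide (q.1 > k))).map
               (fun q => (k, q.1, 1))) := by
  intro l
  induction l with
  | nil => intro d v b; simp
  | cons q t ih =>
    intro d v b
    by_cases hq : q.2 ∈ conns
    · have hmod : (cbiStepA conns k) (d.insert k v, b) q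
          = ((d.insert k (PySem.Set.add v q.1)),
             if q.1 > k then b ++ [(k, q.1, 1)] else b) := by
        simp [cbiStepA, hq, PySem.Dict.modify, PySem.Dict.getD_eq_get?_getD,
              PySem.Dict.get?_insert_self, PySem.Dict.insert_insert_self]
      by_cases hgt : q.1 > k
      · simp only [List.foldl_cons, hmod, if_pos hgt, ih, List.filter_cons, hq, hgt]
        simp
      · simp only [List.foldl_cons, hmod, if_neg hgt, ih, List.filter_cons, hq, hgt]
        simp
    · rw [List.foldl_cons,
          show cbiStepA conns k (d.insert k v, b) q = (d.insert k v, b) from if_neg hq, ih]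
      simp [hq]

-- A's outer loop over fresh, distinct keys
lemma cbiOuterA (points : List (Int × Int)) :
    ∀ (l : List (Int × (Int × Int))) (d : PySem.Dict Int (PySem.Set Int))
      (b : List (Int × Int × Int)),
    (∀ p ∈ l, d.contains p.1 = false) → (l.map (·.1)).Nodup →
    l.foldl (fun st p =>
        (PySem.List.enumerate points).foldl (cbiStepA (cbiConns p.2) p.1)
          (st.1.insert p.1 PySem.Set.empty, st.2)) (d, b)
      = (l.foldl (fun d p => d.insert p.1 (cbiRowV points p.2)) d,
         b ++ l.flatMap (fun p => cbiBondsA points p)) := by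
  intro l
  induction l with
  | nil => intro d b _ _; simp
  | cons p t ih =>
    intro d b hfresh hnd
    simp only [List.foldl_cons, List.flatMap_cons]
    rw [cbiInnerA]
    rw [ih]
    · simp [cbiRowV, cbiBondsA]
    · intro p' hp'
      rw [PySem.Dict.contains_insert]
      have h1 : p'.1 ≠ p.1 := by
        simp only [List.map_cons, List.nodup_cons] at hnd
        intro h; exact hnd.1 (h ▸ List.mem_map_of_mem hp')
      simp [h1, hfresh p' (List.mem_cons_of_mem _ hp')]
    · simp only [List.map_cons, List.nodup_cons] at hnd
      exact hnd.2

-- folding Set.add over fresh distinct elements appends them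
lemma cbiSetAddFold : ∀ (l : List Int) (s : PySem.Set Int),
    l.Nodup → (∀ x ∈ l, x ∉ s) → l.foldl PySem.Set.add s = s ++ l := by
  intro l
  induction l with
  | nil => intro s _ _; simp
  | cons x t ih =>
    intro s hnd hdisj
    have hx : x ∉ s := hdisj x (List.mem_cons_self)
    have hadd : PySem.Set.add s x = s ++ [x] := by
      simp [PySem.Set.add, hx]
    simp only [List.foldl_cons, hadd]
    rw [ih (s ++ [x]) (List.nodup_cons.1 hnd).2]
    · simp
    · intro y hy
      simp only [List.mem_append, List.mem_singleton]
      rintro (h | rfl)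
      · exact hdisj y (List.mem_cons_of_mem _ hy) h
      · exact (List.nodup_cons.1 hnd).1 hy

-- A's set fold computes the row list
lemma cbiRowVFold (conns : List (Int × Int)) :
    ∀ (l : List (Int × (Int × Int))) (s : PySem.Set Int),
    (l.map (·.1)).Nodup → (∀ q ∈ l, q.1 ∉ s) →
    l.foldl (fun s q => if q.2 ∈ conns then PySem.Set.add s q.1 else s) s
      = s ++ (l.filter (fun q => decide (q.2 ∈ conns))).map (·.1) := by
  intro l
  induction l with
  | nil => intro s _ _; simp
  | cons q t ih =>
    intro s hnd hdisj
    simp only [List.map_cons, List.nodup_cons] at hnd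
    by_cases hq : q.2 ∈ conns
    · have hadd : PySem.Set.add s q.1 = s ++ [q.1] := by
        simp [PySem.Set.add, hdisj q List.mem_cons_self]
      have hdisj2 : ∀ q' ∈ t, q'.1 ∉ s ++ [q.1] := by
        intro q' hq'
        simp only [List.mem_append, List.mem_singleton]
        rintro (h | h)
        · exact hdisj q' (List.mem_cons_of_mem _ hq') h
        · exact hnd.1 (h ▸ List.mem_map_of_mem hq')
      rw [List.foldl_cons, if_pos hq, hadd, ih (s ++ [q.1]) hnd.2 hdisj2]
      simp [hq]
    · rw [List.foldl_cons, if_neg hq,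
          ih s hnd.2 (fun q' hq' => hdisj q' (List.mem_cons_of_mem _ hq'))]
      simp [hq]

-- index-dict lookup = ascending indices of the occurrences of c
lemma cbiIndexFold (c : Int × Int) :
    ∀ (l : List (Int × (Int × Int))) (d : PySem.Dict (Int × Int) (List Int)),
    (l.foldl (fun d p => d.insert p.2 (d.getD p.2 [] ++ [p.1])) d).getD c []
      = d.getD c [] ++ (l.filter (fun q => decide (q.2 = c))).map (·.1) := by
  intro l
  induction l with
  | nil => intro d; simp
  | cons p t ih =>
    intro d
    simp only [List.foldl_cons, ih, List.filter_cons]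
    by_cases hp : p.2 = c
    · simp [PySem.Dict.getD_insert, hp]
    · simp [PySem.Dict.getD_insert, hp, Ne.symm hp]

lemma cbiIndex_getD (points : List (Int × Int)) (c : Int × Int) :
    (cbiIndex points).getD c []
      = ((PySem.List.enumerate points).filter (fun q => decide (q.2 = c))).map (·.1) := by
  rw [cbiIndex, cbiIndexFold]
  simp

-- partitioning a filter over a nodup list of keys, up to permutation
lemma cbiFilterSplit (c : Int × Int) (cs : List (Int × Int)) (hc : c ∉ cs) :
    ∀ (l : List (Int × (Int × Int))),
    (l.filter (fun q => decide (q.2 = c)) ++ l.filter (fun q => decide (q.2 ∈ cs))).Perm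
      (l.filter (fun q => decide (q.2 ∈ c :: cs))) := by
  intro l
  induction l with
  | nil => simp
  | cons q t ih =>
    by_cases h1 : q.2 = c
    · simpa [List.filter_cons, h1, hc] using ih.cons q
    · by_cases h2 : q.2 ∈ cs
      · have : (t.filter (fun q => decide (q.2 = c)) ++ q :: t.filter (fun q => decide (q.2 ∈ cs))).Perm
            (q :: (t.filter (fun q => decide (q.2 = c)) ++ t.filter (fun q => decide (q.2 ∈ cs)))) :=
          List.perm_middle
        simpa [List.filter_cons, h1, h2] using this.trans (ih.cons q)
      · simpa [List.filter_cons, h1, h2] using ih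

lemma cbiPerm (l : List (Int × (Int × Int))) :
    ∀ (cs : List (Int × Int)), cs.Nodup →
    (cs.flatMap (fun c => l.filter (fun q => decide (q.2 = c)))).Perm
      (l.filter (fun q => decide (q.2 ∈ cs))) := by
  intro cs
  induction cs with
  | nil => simp
  | cons c t ih =>
    intro hnd
    simp only [List.flatMap_cons]
    have h1 := (ih (List.nodup_cons.1 hnd).2).append_left (l.filter (fun q => decide (q.2 = c)))
    exact h1.trans (cbiFilterSplit c t (List.nodup_cons.1 hnd).1 l)

-- the row is strictly increasing
lemma cbiRow_pairwise (points : List (Int × Int)) (node : Int × Int) :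
    (cbiRow points node).Pairwise (· < ·) := by
  rw [cbiRow, List.pairwise_map]
  exact List.Pairwise.filter _ (by simpa using PySem.List.pairwise_lt_enumerate points 0)

lemma cbiEnum_fst_nodup (points : List (Int × Int)) :
    ((PySem.List.enumerate points).map (·.1)).Nodup := by
  rw [PySem.List.map_fst_enumerate]
  exact PySem.List.nodup_pyRange_one _ _

-- B's sorted six-bucket lookup equals A's row
lemma cbiNbrs_eq_row (points : List (Int × Int)) (node : Int × Int) :
    cbiNbrs (cbiIndex points) node = cbiRow points node := by
  rw [cbiNbrs]
  have hflat : cbiOffsets.flatMap (fun o => (cbiIndex points).getD (node.1 + o.1, node.2 + o.2) [])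
      = ((cbiConns node).flatMap
          (fun c => (PySem.List.enumerate points).filter (fun q => decide (q.2 = c)))).map (·.1) := by
    simp [cbiOffsets, cbiConns, cbiIndex_getD, sub_eq_add_neg]
  rw [hflat]
  apply PySem.List.sorted_eq_of_perm_of_pairwise_lt
  · exact (((cbiPerm (PySem.List.enumerate points) (cbiConns node) (cbiConns_nodup node)).map (·.1)).symm)
  · exact cbiRow_pairwise points node

lemma cbiRow_nodup (points : List (Int × Int)) (node : Int × Int) :
    (cbiRow points node).Nodup := (cbiRow_pairwise points node).imp ne_of_lt

-- A's row value (a PySem.Set built by add) and B's set(nbrs) are the same list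
lemma cbiRowV_eq (points : List (Int × Int)) (node : Int × Int) :
    cbiRowV points node = cbiRow points node := by
  rw [cbiRowV, cbiRowVFold (cbiConns node) _ _ (cbiEnum_fst_nodup points) (by simp)]
  simp [cbiRow]

lemma cbiOfList_row (points : List (Int × Int)) (node : Int × Int) :
    PySem.Set.ofList (cbiRow points node) = cbiRow points node := by
  rw [PySem.Set.ofList_eq_foldl, cbiSetAddFold _ _ (cbiRow_nodup points node) (by simp)]
  simp

-- B's per-node bond contribution equals A's
lemma cbiBondsB_eq (points : List (Int × Int)) (p : Int × (Int × Int)) :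
    ((cbiRow points p.2).filter (fun j => j > p.1)).map (fun j => (p.1, j, 1))
      = cbiBondsA points p := by
  rw [cbiRow, cbiBondsA, List.filter_map, List.map_map, List.filter_filter]
  exact congrArg _ (List.filter_congr (fun a _ => by simp [Bool.and_comm]))

-- B's outer loop over fresh, distinct keys
lemma cbiOuterB (index : PySem.Dict (Int × Int) (List Int)) :
    ∀ (l : List (Int × (Int × Int))) (b : List (Int × Int × Int))
      (d : PySem.Dict Int (PySem.Set Int)),
    l.foldl (fun st p =>
        let nbrs := cbiNbrs index p.2
        (st.1 ++ (nbrs.filter (fun j => j > p.1)).map (fun j => (p.1, j, 1)),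
         st.2.insert p.1 (PySem.Set.ofList nbrs))) (b, d)
      = (b ++ l.flatMap (fun p => ((cbiNbrs index p.2).filter (fun j => j > p.1)).map (fun j => (p.1, j, 1))),
         l.foldl (fun d p => d.insert p.1 (PySem.Set.ofList (cbiNbrs index p.2))) d) := by
  intro l
  induction l with
  | nil => intro b d; simp
  | cons p t ih =>
    intro b d
    simp only [List.foldl_cons, List.flatMap_cons, ih]
    simp

-- ===== VERDICT (by name: the statement is the Claim_ definition above) =====
theorem create_bond_info_spec : Claim_equal_create_bond_info := by
  intro points _
  show create_bond_info points = create_bond_info_alt points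
  rw [create_bond_info, create_bond_info_alt]
  simp only
  rw [cbiOuterA points (PySem.List.enumerate points) PySem.Dict.empty []
        (fun p _ => PySem.Dict.contains_empty p.1) (cbiEnum_fst_nodup points),
      cbiOuterB (cbiIndex points) (PySem.List.enumerate points) [] PySem.Dict.empty]
  have hv : ∀ p : Int × (Int × Int),
      cbiRowV points p.2 = PySem.Set.ofList (cbiNbrs (cbiIndex points) p.2) := by
    intro p
    rw [cbiNbrs_eq_row, cbiRowV_eq, cbiOfList_row]
  have hb : ∀ p : Int × (Int × Int),
      cbiBondsA points p
        = ((cbiNbrs (cbiIndex points) p.2).filter (fun j => j > p.1)).map (fun j => (p.1, j, 1)) := by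
    intro p
    rw [cbiNbrs_eq_row, cbiBondsB_eq]
  dsimp only
  simp only [Prod.mk.injEq]
  have hf : (fun (d : PySem.Dict Int (PySem.Set Int)) (p : Int × (Int × Int)) => d.insert p.1 (cbiRowV points p.2))
      = (fun d p => d.insert p.1 (PySem.Set.ofList (cbiNbrs (cbiIndex points) p.2))) := by
    funext d p
    rw [hv p]
  constructor
  · simp only [List.flatMap]
    exact congrArg List.flatten (List.map_congr_left (fun p _ => hb p))
  · rw [hf]
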